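-- pv_equiv track=rewrite | github.com/jcrattz/data_cube_utilities_sandbox | plotter_utils.py | day_of_year_int_to_str
-- ===== SOURCE A (Python) =====
-- days_per_month = {1: 31, 2: 29, 3: 31, 4: 30, 5: 31, 6: 30,
--                   7: 31, 8: 31, 9: 30, 10: 31, 11: 30, 12: 31}
--
-- month_names_long = ['January', 'February', 'March', 'April', 'May', 'June',
--                     'July', 'August', 'September', 'October', 'November', 'December']
--
-- def day_of_year_int_to_str(day):
--     """
--     Converts an integer day of year to a string containing the month and day, like "January 1".
--     The argument value must be in range [1,366].
--
--     Parameters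
--     ---------
--     day: int
--         The day of the year, represented as an integer.
--     """
--     month_int = 1
--     while month_int < 12:
--         days_curr_month = days_per_month[month_int]
--         if day < days_curr_month:
--             break
--         else:
--             day -= days_curr_month
--             month_int += 1
--     month_name = month_names_long[month_int - 1]
--     return "{} {}".format(month_name, day)
-- ===== SOURCE B (Python) =====
-- month_names_long = ['January', 'February', 'March', 'April', 'May', 'June',
--                     'July', 'August', 'September', 'October', 'November', 'December']
--
-- # cumulative days before each month (leap year: Feb = 29); cum[m] = days before month m+1
-- _cum = [0, 31, 60, 91, 121, 152, 182, 213, 244, 274, 305, 335]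
--
-- def day_of_year_int_to_str(day):
--     """
--     Converts an integer day of year to a string containing the month and day, like "January 1".
--     The argument value must be in range [1,366].
--     """
--     month = next((m for m in range(1, 12) if day < _cum[m]), 12)
--     return "{} {}".format(month_names_long[month - 1], day - _cum[month - 1])
-- ===== Notes on version B (the rewrite author's own statement) =====
-- stated objective: simpler
-- what changed: Replaced A's while-loop that repeatedly subtracts each month's length from day with a precomputed cumulative prefix-sum table: the month is the first index m in 1..11 with day < cum[m] (default 12) and the day offset is day - cum[m-1], a single lookup with no mutation.
import Mathlib
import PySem

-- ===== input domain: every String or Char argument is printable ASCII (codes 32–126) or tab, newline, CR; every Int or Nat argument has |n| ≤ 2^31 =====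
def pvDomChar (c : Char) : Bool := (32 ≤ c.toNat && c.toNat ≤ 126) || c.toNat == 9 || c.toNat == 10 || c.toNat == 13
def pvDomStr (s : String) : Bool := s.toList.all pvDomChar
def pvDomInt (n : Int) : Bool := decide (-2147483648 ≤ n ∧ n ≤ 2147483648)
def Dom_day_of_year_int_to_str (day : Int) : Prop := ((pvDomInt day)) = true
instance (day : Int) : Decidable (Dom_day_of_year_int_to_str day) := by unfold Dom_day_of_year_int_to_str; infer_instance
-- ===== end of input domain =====

-- B replaces A's month-by-month subtraction loop with a precomputed prefix-sum table and a
-- single first-index lookup over it (objective: simpler decomposition; same cost).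

-- ===== PORT A =====
def days_per_month : PySem.Dict Int Int :=
  PySem.Dict.ofList [(1,31),(2,29),(3,31),(4,30),(5,31),(6,30),(7,31),(8,31),(9,30),(10,31),(11,30),(12,31)]

def month_names_long : List String :=
  ["January","February","March","April","May","June",
   "July","August","September","October","November","December"]

-- the while loop of A: state (month_int, day); fuel 11 is exact (month_int runs from 1, at most 11 iterations).
-- days_per_month[month_int]: the key is always present for month_int ∈ 1..11, so getD 0 is exact here.
def pyALoop (month_int day : Int) : Nat → Int × Int
  | 0 => (month_int, day)
  | fuel+1 =>
    if month_int < 12 then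
      let days_curr_month := (days_per_month.get? month_int).getD 0
      if day < days_curr_month then (month_int, day)
      else pyALoop (month_int + 1) (day - days_curr_month) fuel
    else (month_int, day)

def day_of_year_int_to_str (day : Int) : String :=
  let st := pyALoop 1 day 11
  -- month_names_long[month_int - 1]: month_int ∈ 1..12, so the index is in range and getD "" is exact.
  ((PySem.List.pyGet? month_names_long (st.1 - 1)).getD "") ++ " " ++ PySem.Int.toStr st.2

-- ===== PORT B =====
-- cumulative days before each month (leap year: Feb = 29); _cum[m] = days before month m+1
def pyCum : List Int := [0, 31, 60, 91, 121, 152, 182, 213, 244, 274, 305, 335]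

-- next((m for m in range(1,12) if day < _cum[m]), 12): first m with day < _cum[m], default 12.
-- indices are always in range, so getD is exact.
def pyFirstMonth (day : Int) : List Int → Int
  | [] => 12
  | m :: rest => if day < (PySem.List.pyGet? pyCum m).getD 0 then m else pyFirstMonth day rest

def day_of_year_int_to_str_alt (day : Int) : String :=
  let month := pyFirstMonth day (PySem.List.pyRange 1 12 1)
  ((PySem.List.pyGet? month_names_long (month - 1)).getD "") ++ " " ++
    PySem.Int.toStr (day - (PySem.List.pyGet? pyCum (month - 1)).getD 0)

-- ===== PRECONDITION & SPEC =====
def Spec_day_of_year_int_to_str (day : Int) (out : String) : Prop := out = day_of_year_int_to_str_alt day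
instance (day : Int) (out : String) : Decidable (Spec_day_of_year_int_to_str day out) := by unfold Spec_day_of_year_int_to_str; infer_instance

-- ===== CLAIM (what is proved, stated in full; the proofs are below) =====
def Claim_equal_day_of_year_int_to_str : Prop := ∀ (day : Int), Dom_day_of_year_int_to_str day → Spec_day_of_year_int_to_str day (day_of_year_int_to_str day)

-- ===== LEMMAS AND PROOFS =====

-- both sides reduce to the same canonical 12-way case split on day
theorem loopA_eq (day : Int) : pyALoop 1 day 11 =
    (if day < 31 then (1, day)
     else if day < 60 then (2, day - 31)
     else if day < 91 then (3, day - 60)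
     else if day < 121 then (4, day - 91)
     else if day < 152 then (5, day - 121)
     else if day < 182 then (6, day - 152)
     else if day < 213 then (7, day - 182)
     else if day < 244 then (8, day - 213)
     else if day < 274 then (9, day - 244)
     else if day < 305 then (10, day - 274)
     else if day < 335 then (11, day - 305)
     else (12, day - 335)) := by
  have g1 : days_per_month.get? 1 = some 31 := by decide
  have g2 : days_per_month.get? 2 = some 29 := by decide
  have g3 : days_per_month.get? 3 = some 31 := by decide
  have g4 : days_per_month.get? 4 = some 30 := by decide
  have g5 : days_per_month.get? 5 = some 31 := by decide
  have g6 : days_per_month.get? 6 = some 30 := by decide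
  have g7 : days_per_month.get? 7 = some 31 := by decide
  have g8 : days_per_month.get? 8 = some 31 := by decide
  have g9 : days_per_month.get? 9 = some 30 := by decide
  have g10 : days_per_month.get? 10 = some 31 := by decide
  have g11 : days_per_month.get? 11 = some 30 := by decide
  simp only [pyALoop]
  simp only [Int.reduceAdd]
  simp only [g1,g2,g3,g4,g5,g6,g7,g8,g9,g10,g11, Option.getD_some]
  simp only [Int.reduceLT, reduceIte]
  simp only [sub_sub, Int.reduceAdd]
  simp only [show ∀ x : Int, (x - 31 < 29) = (x < 60) from fun x => propext (by omega),
    show ∀ x : Int, (x - 60 < 31) = (x < 91) from fun x => propext (by omega),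
    show ∀ x : Int, (x - 91 < 30) = (x < 121) from fun x => propext (by omega),
    show ∀ x : Int, (x - 121 < 31) = (x < 152) from fun x => propext (by omega),
    show ∀ x : Int, (x - 152 < 30) = (x < 182) from fun x => propext (by omega),
    show ∀ x : Int, (x - 182 < 31) = (x < 213) from fun x => propext (by omega),
    show ∀ x : Int, (x - 213 < 31) = (x < 244) from fun x => propext (by omega),
    show ∀ x : Int, (x - 244 < 30) = (x < 274) from fun x => propext (by omega),
    show ∀ x : Int, (x - 274 < 31) = (x < 305) from fun x => propext (by omega),
    show ∀ x : Int, (x - 305 < 30) = (x < 335) from fun x => propext (by omega)]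

theorem firstB_eq (day : Int) : pyFirstMonth day (PySem.List.pyRange 1 12 1) =
    (if day < 31 then (1 : Int)
     else if day < 60 then 2
     else if day < 91 then 3
     else if day < 121 then 4
     else if day < 152 then 5
     else if day < 182 then 6
     else if day < 213 then 7
     else if day < 244 then 8
     else if day < 274 then 9
     else if day < 305 then 10
     else if day < 335 then 11
     else 12) := by
  have hr : PySem.List.pyRange 1 12 1 = [1,2,3,4,5,6,7,8,9,10,11] := by decide
  have c1 : (PySem.List.pyGet? pyCum (1:Int)).getD 0 = 31 := by decide
  have c2 : (PySem.List.pyGet? pyCum (2:Int)).getD 0 = 60 := by decide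
  have c3 : (PySem.List.pyGet? pyCum (3:Int)).getD 0 = 91 := by decide
  have c4 : (PySem.List.pyGet? pyCum (4:Int)).getD 0 = 121 := by decide
  have c5 : (PySem.List.pyGet? pyCum (5:Int)).getD 0 = 152 := by decide
  have c6 : (PySem.List.pyGet? pyCum (6:Int)).getD 0 = 182 := by decide
  have c7 : (PySem.List.pyGet? pyCum (7:Int)).getD 0 = 213 := by decide
  have c8 : (PySem.List.pyGet? pyCum (8:Int)).getD 0 = 244 := by decide
  have c9 : (PySem.List.pyGet? pyCum (9:Int)).getD 0 = 274 := by decide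
  have c10 : (PySem.List.pyGet? pyCum (10:Int)).getD 0 = 305 := by decide
  have c11 : (PySem.List.pyGet? pyCum (11:Int)).getD 0 = 335 := by decide
  rw [hr]
  simp only [pyFirstMonth, c1,c2,c3,c4,c5,c6,c7,c8,c9,c10,c11]

-- ===== VERDICT (by name: the statement is the Claim_ definition above) =====
set_option maxHeartbeats 2000000 in
theorem day_of_year_int_to_str_spec : Claim_equal_day_of_year_int_to_str := by
  intro day _
  unfold Spec_day_of_year_int_to_str day_of_year_int_to_str day_of_year_int_to_str_alt
  have n1 : (PySem.List.pyGet? month_names_long ((1:Int)-1)).getD "" = "January" := by decide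
  have n2 : (PySem.List.pyGet? month_names_long ((2:Int)-1)).getD "" = "February" := by decide
  have n3 : (PySem.List.pyGet? month_names_long ((3:Int)-1)).getD "" = "March" := by decide
  have n4 : (PySem.List.pyGet? month_names_long ((4:Int)-1)).getD "" = "April" := by decide
  have n5 : (PySem.List.pyGet? month_names_long ((5:Int)-1)).getD "" = "May" := by decide
  have n6 : (PySem.List.pyGet? month_names_long ((6:Int)-1)).getD "" = "June" := by decide
  have n7 : (PySem.List.pyGet? month_names_long ((7:Int)-1)).getD "" = "July" := by decide
  have n8 : (PySem.List.pyGet? month_names_long ((8:Int)-1)).getD "" = "August" := by decide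
  have n9 : (PySem.List.pyGet? month_names_long ((9:Int)-1)).getD "" = "September" := by decide
  have n10 : (PySem.List.pyGet? month_names_long ((10:Int)-1)).getD "" = "October" := by decide
  have n11 : (PySem.List.pyGet? month_names_long ((11:Int)-1)).getD "" = "November" := by decide
  have n12 : (PySem.List.pyGet? month_names_long ((12:Int)-1)).getD "" = "December" := by decide
  have d1 : (PySem.List.pyGet? pyCum ((1:Int)-1)).getD 0 = 0 := by decide
  have d2 : (PySem.List.pyGet? pyCum ((2:Int)-1)).getD 0 = 31 := by decide
  have d3 : (PySem.List.pyGet? pyCum ((3:Int)-1)).getD 0 = 60 := by decide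
  have d4 : (PySem.List.pyGet? pyCum ((4:Int)-1)).getD 0 = 91 := by decide
  have d5 : (PySem.List.pyGet? pyCum ((5:Int)-1)).getD 0 = 121 := by decide
  have d6 : (PySem.List.pyGet? pyCum ((6:Int)-1)).getD 0 = 152 := by decide
  have d7 : (PySem.List.pyGet? pyCum ((7:Int)-1)).getD 0 = 182 := by decide
  have d8 : (PySem.List.pyGet? pyCum ((8:Int)-1)).getD 0 = 213 := by decide
  have d9 : (PySem.List.pyGet? pyCum ((9:Int)-1)).getD 0 = 244 := by decide
  have d10 : (PySem.List.pyGet? pyCum ((10:Int)-1)).getD 0 = 274 := by decide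
  have d11 : (PySem.List.pyGet? pyCum ((11:Int)-1)).getD 0 = 305 := by decide
  have d12 : (PySem.List.pyGet? pyCum ((12:Int)-1)).getD 0 = 335 := by decide
  simp only [loopA_eq, firstB_eq]
  split_ifs <;> simp only [n1,n2,n3,n4,n5,n6,n7,n8,n9,n10,n11,n12,d1,d2,d3,d4,d5,d6,d7,d8,d9,d10,d11,d12, Int.sub_zero]
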